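-- pv_equiv track=rewrite | github.com/WuZheng0216/wargame2025 | rule_book.py | _platform_target_priority_score
-- ===== SOURCE A (Python) =====
-- def _platform_target_priority_score(target_id: str, platform_mode: str) -> int:
--     target = (target_id or "").upper()
--     if "MERCHANT_SHIP_SURFACE" in target:
--         return -1000
--     if platform_mode == "surface":
--         ranking = [
--             ("TRUCK_GROUND", 120),
--             ("GUIDE_SHIP_SURFACE", 110),
--             ("RECON_UAV_FIXWING", 80),
--             ("SHIPBOARD_AIRCRAFT_FIXWING", 70),
--         ]
--     else:
--         ranking = [
--             ("RECON_UAV_FIXWING", 120),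
--             ("GUIDE_SHIP_SURFACE", 108),
--             ("TRUCK_GROUND", 95),
--             ("SHIPBOARD_AIRCRAFT_FIXWING", 70),
--         ]
--     for key, score in ranking:
--         if key in target:
--             return score
--     return 20
-- ===== SOURCE B (Python) =====
-- _SCORE_TABLE = {
--     "TRUCK_GROUND": (120, 95),
--     "GUIDE_SHIP_SURFACE": (110, 108),
--     "RECON_UAV_FIXWING": (80, 120),
--     "SHIPBOARD_AIRCRAFT_FIXWING": (70, 70),
-- }
--
-- def _platform_target_priority_score(target_id: str, platform_mode: str) -> int:
--     target = (target_id or "").upper()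
--     if "MERCHANT_SHIP_SURFACE" in target:
--         return -1000
--     idx = 0 if platform_mode == "surface" else 1
--     best = 20
--     for key, scores in _SCORE_TABLE.items():
--         if key in target and scores[idx] > best:
--             best = scores[idx]
--     return best
-- ===== Notes on version B (the rewrite author's own statement) =====
-- stated objective: alternative
-- what changed: Replaces the two mode-specific descending rankings and a first-match early-return loop by a single shared table keyed on platform key with a (surface, other) score pair, scanned once with a running-maximum accumulator (default 20); equivalent because each original ranking is descending, so the first match is the maximum matching score.
import Mathlib
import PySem

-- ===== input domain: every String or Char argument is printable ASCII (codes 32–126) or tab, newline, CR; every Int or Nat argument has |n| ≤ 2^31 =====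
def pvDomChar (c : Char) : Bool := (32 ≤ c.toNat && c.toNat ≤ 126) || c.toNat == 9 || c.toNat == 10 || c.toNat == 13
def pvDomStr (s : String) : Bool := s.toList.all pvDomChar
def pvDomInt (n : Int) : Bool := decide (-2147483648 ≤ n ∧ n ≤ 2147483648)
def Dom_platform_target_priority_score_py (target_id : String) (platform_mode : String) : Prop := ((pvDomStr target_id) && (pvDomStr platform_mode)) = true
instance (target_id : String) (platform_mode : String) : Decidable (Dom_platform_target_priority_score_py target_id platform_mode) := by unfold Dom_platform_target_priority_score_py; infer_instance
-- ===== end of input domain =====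

-- B replaces the two mode-specific descending rankings + first-match loop by one shared (surface,other) score table scanned with a running-maximum accumulator (objective: alternative decomposition, same cost).


-- ===== PORT A =====
-- A's `for key, score in ranking: if key in target: return score` / `return 20`
def pvFirstMatch : List (String × Int) → String → Int
  | [], _ => 20
  | (k, s) :: rest, t => if PySem.Str.isIn k t then s else pvFirstMatch rest t

def platform_target_priority_score_py (target_id : String) (platform_mode : String) : Int :=
  let target := PySem.Str.upper (if target_id == "" then "" else target_id)
  if PySem.Str.isIn "MERCHANT_SHIP_SURFACE" target then -1000
  else
    let ranking : List (String × Int) :=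
      if platform_mode == "surface" then
        [("TRUCK_GROUND", 120), ("GUIDE_SHIP_SURFACE", 110),
         ("RECON_UAV_FIXWING", 80), ("SHIPBOARD_AIRCRAFT_FIXWING", 70)]
      else
        [("RECON_UAV_FIXWING", 120), ("GUIDE_SHIP_SURFACE", 108),
         ("TRUCK_GROUND", 95), ("SHIPBOARD_AIRCRAFT_FIXWING", 70)]
    pvFirstMatch ranking target

-- ===== PORT B =====
-- B's shared module-level table: key ↦ (surface score, other-mode score)
def pvScoreTable : List (String × Int × Int) :=
  [("TRUCK_GROUND", 120, 95), ("GUIDE_SHIP_SURFACE", 110, 108),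
   ("RECON_UAV_FIXWING", 80, 120), ("SHIPBOARD_AIRCRAFT_FIXWING", 70, 70)]

-- B's running-maximum loop: `if key in target and scores[idx] > best: best = scores[idx]`
def pvBestLoop (surface : Bool) (t : String) : List (String × Int × Int) → Int → Int
  | [], best => best
  | (k, sS, sO) :: rest, best =>
      let sc := if surface then sS else sO
      pvBestLoop surface t rest (if PySem.Str.isIn k t && decide (sc > best) then sc else best)

def platform_target_priority_score_py_alt (target_id : String) (platform_mode : String) : Int :=
  let target := PySem.Str.upper (if target_id == "" then "" else target_id)
  if PySem.Str.isIn "MERCHANT_SHIP_SURFACE" target then -1000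
  else pvBestLoop (platform_mode == "surface") target pvScoreTable 20

-- ===== PRECONDITION & SPEC =====
def Spec_platform_target_priority_score_py (target_id : String) (platform_mode : String) (out : Int) : Prop := out = platform_target_priority_score_py_alt target_id platform_mode
instance (target_id : String) (platform_mode : String) (out : Int) : Decidable (Spec_platform_target_priority_score_py target_id platform_mode out) := by unfold Spec_platform_target_priority_score_py; infer_instance

-- ===== CLAIM (what is proved, stated in full; the proofs are below) =====
def Claim_equal_platform_target_priority_score_py : Prop := ∀ (target_id : String) (platform_mode : String), Dom_platform_target_priority_score_py target_id platform_mode → Spec_platform_target_priority_score_py target_id platform_mode (platform_target_priority_score_py target_id platform_mode)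

-- ===== LEMMAS AND PROOFS =====
-- For either mode, A's first match over its descending ranking equals B's running max over the shared table.
theorem pvFirstMatch_eq_bestLoop (surface : Bool) (t : String) :
    pvFirstMatch
      (if surface then
        [("TRUCK_GROUND", 120), ("GUIDE_SHIP_SURFACE", 110),
         ("RECON_UAV_FIXWING", 80), ("SHIPBOARD_AIRCRAFT_FIXWING", 70)]
       else
        [("RECON_UAV_FIXWING", 120), ("GUIDE_SHIP_SURFACE", 108),
         ("TRUCK_GROUND", 95), ("SHIPBOARD_AIRCRAFT_FIXWING", 70)]) t
      = pvBestLoop surface t pvScoreTable 20 := by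
  cases surface <;>
  · simp only [pvScoreTable, pvFirstMatch, pvBestLoop, if_true, if_false, Bool.false_eq_true]
    cases h1 : PySem.Str.isIn "TRUCK_GROUND" t <;>
    cases h2 : PySem.Str.isIn "GUIDE_SHIP_SURFACE" t <;>
    cases h3 : PySem.Str.isIn "RECON_UAV_FIXWING" t <;>
    cases h4 : PySem.Str.isIn "SHIPBOARD_AIRCRAFT_FIXWING" t <;>
      simp [h1, h2, h3, h4]

-- ===== VERDICT (by name: the statement is the Claim_ definition above) =====
theorem platform_target_priority_score_py_spec : Claim_equal_platform_target_priority_score_py := by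
  intro target_id platform_mode _
  unfold Spec_platform_target_priority_score_py platform_target_priority_score_py platform_target_priority_score_py_alt
  by_cases hm : PySem.Str.isIn "MERCHANT_SHIP_SURFACE"
      (PySem.Str.upper (if target_id == "" then "" else target_id)) = true
  · simp only [hm, if_true]
  · simp only [hm, if_false, Bool.false_eq_true]
    exact pvFirstMatch_eq_bestLoop (platform_mode == "surface") _
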